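-- pv_equiv track=rewrite | github.com/developer-shkim/algorithm | programmers/array/p_30_87377.py | get_intersection_list
-- ===== SOURCE A (Python) =====
-- def get_intersection_list(points):
--     min_x, max_x = min(point[0] for point in points), max(point[0] for point in points)
--     min_y, max_y = min(point[1] for point in points), max(point[1] for point in points)
--
--     cols, rows = int(max_x - min_x + 1), int(max_y - min_y + 1)
--
--     grid = [['.'] * cols for _ in range(rows)]
--
--     for point in points:
--         y = 0 if point[0] == min_x else int(abs(min_x - point[0]))
--         x = 0 if point[1] == max_y else int(abs(max_y - point[1]))
--
--         grid[x][y] = "*"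
--
--     return [''.join(row) for row in grid]
-- ===== SOURCE B (Python) =====
-- def get_intersection_list(points):
--     xs = [p[0] for p in points]
--     ys = [p[1] for p in points]
--     min_x, max_x = min(xs), max(xs)
--     min_y, max_y = min(ys), max(ys)
--     pts = {(p[0], p[1]) for p in points}
--     xr = range(min_x, max_x + 1)
--     return [''.join('*' if (x, y) in pts else '.' for x in xr)
--             for y in range(max_y, min_y - 1, -1)]
-- ===== Notes on version B (the rewrite author's own statement) =====
-- stated objective: alternative
-- what changed: B inverts A's traversal: instead of scattering each point into a mutable dense grid via per-point index formulas, B builds a set of the raw (x,y) coordinate pairs and gathers each output cell, walking y from max_y down to min_y and x from min_x to max_x and testing whether (x,y) is a point; the grid and A's abs-based index arithmetic disappear entirely.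
import Mathlib
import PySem

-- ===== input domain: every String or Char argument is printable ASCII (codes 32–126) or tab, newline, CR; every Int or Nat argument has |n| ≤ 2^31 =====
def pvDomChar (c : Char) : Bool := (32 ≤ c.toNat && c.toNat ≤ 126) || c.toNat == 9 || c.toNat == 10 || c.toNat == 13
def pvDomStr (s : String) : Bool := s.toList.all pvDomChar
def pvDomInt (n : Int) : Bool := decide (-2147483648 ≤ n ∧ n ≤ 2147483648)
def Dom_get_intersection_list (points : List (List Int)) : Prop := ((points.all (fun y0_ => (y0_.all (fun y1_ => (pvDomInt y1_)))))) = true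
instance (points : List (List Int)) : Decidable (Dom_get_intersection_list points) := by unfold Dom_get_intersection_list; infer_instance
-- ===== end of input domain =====

-- B gathers each output cell from a set of the raw (x,y) coordinate pairs (cell-driven),
-- instead of A's point-driven scatter into a mutable dense grid (objective: alternative).

-- ===== PORT A =====
-- A's per-point index formulas:
-- y = 0 if point[0] == min_x else int(abs(min_x - point[0]))
def pvY (min_x : Int) (point : List Int) : Int :=
  if PySem.List.pyGetD point 0 0 = min_x then 0 else |min_x - PySem.List.pyGetD point 0 0|
-- x = 0 if point[1] == max_y else int(abs(max_y - point[1]))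
def pvX (max_y : Int) (point : List Int) : Int :=
  if PySem.List.pyGetD point 1 0 = max_y then 0 else |max_y - PySem.List.pyGetD point 1 0|

def get_intersection_list (points : List (List Int)) : List String :=
  let xs := points.map (fun point => PySem.List.pyGetD point 0 0)
  let ys := points.map (fun point => PySem.List.pyGetD point 1 0)
  let min_x := (PySem.List.min? xs (fun v => v)).getD 0
  let max_x := (PySem.List.max? xs (fun v => v)).getD 0
  let min_y := (PySem.List.min? ys (fun v => v)).getD 0
  let max_y := (PySem.List.max? ys (fun v => v)).getD 0
  let cols := max_x - min_x + 1
  let rows := max_y - min_y + 1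
  let grid0 := List.replicate rows.toNat (List.replicate cols.toNat '.')
  let grid := points.foldl (fun g point =>
    g.modify (pvX max_y point).toNat (fun row => row.set (pvY min_x point).toNat '*')) grid0
  grid.map (fun row => String.mk row)

-- ===== PORT B =====
def get_intersection_list_alt (points : List (List Int)) : List String :=
  let xs := points.map (fun p => PySem.List.pyGetD p 0 0)
  let ys := points.map (fun p => PySem.List.pyGetD p 1 0)
  let min_x := (PySem.List.min? xs (fun v => v)).getD 0
  let max_x := (PySem.List.max? xs (fun v => v)).getD 0
  let min_y := (PySem.List.min? ys (fun v => v)).getD 0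
  let max_y := (PySem.List.max? ys (fun v => v)).getD 0
  let pts : PySem.Set (Int × Int) :=
    PySem.Set.ofList (points.map (fun p => (PySem.List.pyGetD p 0 0, PySem.List.pyGetD p 1 0)))
  let xr := PySem.List.pyRange min_x (max_x + 1) 1
  (PySem.List.pyRange max_y (min_y - 1) (-1)).map (fun y =>
    String.mk (xr.map (fun x => if PySem.Set.contains pts (x, y) then '*' else '.')))

-- ===== PRECONDITION & SPEC =====
-- Pre_ excludes exactly the inputs where A raises: an empty list (min() -> ValueError)
-- and a point with fewer than two coordinates (point[0]/point[1] -> IndexError).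
def Pre_get_intersection_list (points : List (List Int)) : Prop :=
  points ≠ [] ∧ ∀ p ∈ points, 2 ≤ p.length
instance (points : List (List Int)) : Decidable (Pre_get_intersection_list points) := by
  unfold Pre_get_intersection_list; infer_instance
def pvWitness_get_intersection_list : List (List Int) := [[0, 0], [1, 2]]

def Spec_get_intersection_list (points : List (List Int)) (out : List String) : Prop := out = get_intersection_list_alt points
instance (points : List (List Int)) (out : List String) : Decidable (Spec_get_intersection_list points out) := by unfold Spec_get_intersection_list; infer_instance

-- ===== CLAIM =====
def Claim_equal_get_intersection_list : Prop := ∀ (points : List (List Int)), Dom_get_intersection_list points → Pre_get_intersection_list points → Spec_get_intersection_list points (get_intersection_list points)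

-- ===== LEMMAS AND PROOFS =====

-- with the extremal bounds, A's index formulas are just the affine coordinate change
theorem pvX_eq (M : Int) (p : List Int) (h : PySem.List.pyGetD p 1 0 ≤ M) :
    pvX M p = M - PySem.List.pyGetD p 1 0 := by
  unfold pvX; split
  · omega
  · rw [abs_of_nonneg (by omega)]

theorem pvY_eq (m : Int) (p : List Int) (h : m ≤ PySem.List.pyGetD p 0 0) :
    pvY m p = PySem.List.pyGetD p 0 0 - m := by
  unfold pvY; split
  · omega
  · rw [abs_of_nonpos (by omega)]; ring

-- the value at cell (r, c), total form
def pvCell (g : List (List Char)) (r c : Nat) : Char := ((g[r]?.getD [])[c]?).getD '.'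

theorem pvCell_step (g : List (List Char)) (xi yi r c : Nat)
    (hx : xi < g.length) (hy : yi < (g[xi]'hx).length) :
    pvCell (g.modify xi (fun row => row.set yi '*')) r c =
      if xi = r ∧ yi = c then '*' else pvCell g r c := by
  unfold pvCell
  rw [List.getElem?_modify]
  by_cases hr : xi = r
  · subst hr
    rw [List.getElem?_eq_getElem hx]
    simp only [Option.getD_some]
    by_cases hc : yi = c
    · subst hc
      simp [hy]
    · simp [hc]
  · simp [hr]

-- A's grid fold, characterised cell by cell (with length preservation)
theorem foldA_spec (m M : Int) (C : Nat) :
    ∀ (ps : List (List Int)) (g : List (List Char))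
      (hrow : ∀ row ∈ g, row.length = C)
      (hps : ∀ p ∈ ps, (pvX M p).toNat < g.length ∧ (pvY m p).toNat < C),
      (let g' := ps.foldl (fun g point =>
          g.modify (pvX M point).toNat (fun row => row.set (pvY m point).toNat '*')) g
       g'.length = g.length ∧ (∀ row ∈ g', row.length = C) ∧
       ∀ r c, pvCell g' r c =
         if ∃ p ∈ ps, (pvX M p).toNat = r ∧ (pvY m p).toNat = c then '*' else pvCell g r c) := by
  intro ps
  induction ps with
  | nil => intro g hrow hps; refine ⟨rfl, hrow, ?_⟩; intro r c; simp
  | cons p t ih =>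
    intro g hrow hps
    simp only [List.foldl_cons]
    set g1 := g.modify (pvX M p).toNat (fun row => row.set (pvY m p).toNat '*') with hg1
    have hlen1 : g1.length = g.length := by simp [hg1]
    have hrow1 : ∀ row ∈ g1, row.length = C := by
      intro row hr
      obtain ⟨j, hj, hrow'⟩ := List.mem_iff_getElem.mp hr
      rw [List.getElem_modify] at hrow'
      subst hrow'
      split
      · rw [List.length_set]; exact hrow _ (List.getElem_mem _)
      · exact hrow _ (List.getElem_mem _)
    have hpbound := hps p (List.mem_cons_self)
    have ht : ∀ q ∈ t, (pvX M q).toNat < g1.length ∧ (pvY m q).toNat < C := by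
      intro q hq; rw [hlen1]; exact hps q (List.mem_cons_of_mem _ hq)
    obtain ⟨l1, l2, l3⟩ := ih g1 hrow1 ht
    refine ⟨by rw [l1, hlen1], l2, ?_⟩
    intro r c
    have hy' : (pvY m p).toNat < (g[(pvX M p).toNat]'hpbound.1).length := by
      rw [hrow _ (List.getElem_mem _)]; exact hpbound.2
    rw [l3 r c, pvCell_step g _ _ r c hpbound.1 hy']
    by_cases h1 : ∃ q ∈ t, (pvX M q).toNat = r ∧ (pvY m q).toNat = c
    · rw [if_pos h1, if_pos ⟨h1.choose, List.mem_cons_of_mem _ h1.choose_spec.1, h1.choose_spec.2⟩]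
    · rw [if_neg h1]
      by_cases h2 : (pvX M p).toNat = r ∧ (pvY m p).toNat = c
      · rw [if_pos h2, if_pos ⟨p, List.mem_cons_self, h2⟩]
      · rw [if_neg h2, if_neg ?_]
        rintro ⟨q, hq, hc⟩
        rcases List.mem_cons.mp hq with rfl | hq
        · exact h2 hc
        · exact h1 ⟨q, hq, hc⟩

theorem get_intersection_list_spec : Claim_equal_get_intersection_list := by
  intro points _hdom hpre
  obtain ⟨hne, hlen⟩ := hpre
  unfold Spec_get_intersection_list get_intersection_list get_intersection_list_alt
  simp only []
  set xs := points.map (fun point => PySem.List.pyGetD point 0 0) with hxs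
  set ys := points.map (fun point => PySem.List.pyGetD point 1 0) with hys
  have hxne : xs ≠ [] := by simp [hxs, hne]
  have hyne : ys ≠ [] := by simp [hys, hne]
  have hx0 : PySem.List.min? xs (fun v => v) ≠ none :=
    fun h => hxne ((PySem.List.min?_eq_none_iff xs (fun v => v)).mp h)
  have hx0' : PySem.List.max? xs (fun v => v) ≠ none :=
    fun h => hxne ((PySem.List.max?_eq_none_iff xs (fun v => v)).mp h)
  have hy0 : PySem.List.min? ys (fun v => v) ≠ none :=
    fun h => hyne ((PySem.List.min?_eq_none_iff ys (fun v => v)).mp h)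
  have hy0' : PySem.List.max? ys (fun v => v) ≠ none :=
    fun h => hyne ((PySem.List.max?_eq_none_iff ys (fun v => v)).mp h)
  obtain ⟨mx, hmx⟩ := Option.ne_none_iff_exists'.mp hx0
  obtain ⟨Mx, hMx⟩ := Option.ne_none_iff_exists'.mp hx0'
  obtain ⟨my, hmy⟩ := Option.ne_none_iff_exists'.mp hy0
  obtain ⟨My, hMy⟩ := Option.ne_none_iff_exists'.mp hy0'
  rw [hmx, hMx, hmy, hMy]
  simp only [Option.getD_some]
  set C := (Mx - mx + 1).toNat with hC
  set R := (My - my + 1).toNat with hR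
  -- per-point bounds from the extremal values
  have hb : ∀ p ∈ points, mx ≤ PySem.List.pyGetD p 0 0 ∧ PySem.List.pyGetD p 0 0 ≤ Mx ∧
      my ≤ PySem.List.pyGetD p 1 0 ∧ PySem.List.pyGetD p 1 0 ≤ My := by
    intro p hp
    have h0 : PySem.List.pyGetD p 0 0 ∈ xs := by rw [hxs]; exact List.mem_map_of_mem hp
    have h1 : PySem.List.pyGetD p 1 0 ∈ ys := by rw [hys]; exact List.mem_map_of_mem hp
    exact ⟨PySem.List.min?_isMin hmx _ h0, PySem.List.max?_isMax hMx _ h0,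
           PySem.List.min?_isMin hmy _ h1, PySem.List.max?_isMax hMy _ h1⟩
  have hbounds : ∀ p ∈ points, (pvX My p).toNat < R ∧ (pvY mx p).toNat < C := by
    intro p hp
    obtain ⟨b1, b2, b3, b4⟩ := hb p hp
    rw [pvX_eq My p b4, pvY_eq mx p b1]
    omega
  obtain ⟨l1, l2, l3⟩ := foldA_spec mx My C points
    (List.replicate R (List.replicate C '.'))
    (by intro row hr; simp [List.eq_of_mem_replicate hr])
    (by simpa using hbounds)
  set g' := points.foldl (fun g point =>
      g.modify (pvX My point).toNat (fun row => row.set (pvY mx point).toNat '*'))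
      (List.replicate R (List.replicate C '.'))
  have hlen' : g'.length = R := by rw [l1]; simp
  -- membership in B's coordinate set ↔ the existential in A's cell characterisation
  set pts := PySem.Set.ofList (points.map
      (fun p => (PySem.List.pyGetD p 0 0, PySem.List.pyGetD p 1 0))) with hpts
  have hmem : ∀ (r c : Nat),
      ((mx + (c : Int), My - (r : Int)) ∈ pts) ↔
      (∃ p ∈ points, (pvX My p).toNat = r ∧ (pvY mx p).toNat = c) := by
    intro r c
    rw [hpts, PySem.Set.mem_ofList, List.mem_map]
    constructor
    · rintro ⟨p, hp, he⟩
      obtain ⟨b1, b2, b3, b4⟩ := hb p hp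
      refine ⟨p, hp, ?_⟩
      rw [pvX_eq My p b4, pvY_eq mx p b1]
      have h1 : PySem.List.pyGetD p 0 0 = mx + (c : Int) := congrArg Prod.fst he
      have h2 : PySem.List.pyGetD p 1 0 = My - (r : Int) := congrArg Prod.snd he
      omega
    · rintro ⟨p, hp, h1, h2⟩
      obtain ⟨b1, b2, b3, b4⟩ := hb p hp
      rw [pvX_eq My p b4] at h1
      rw [pvY_eq mx p b1] at h2
      refine ⟨p, hp, ?_⟩
      have : PySem.List.pyGetD p 0 0 = mx + (c : Int) := by omega
      have h2' : PySem.List.pyGetD p 1 0 = My - (r : Int) := by omega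
      rw [this, h2']
  -- assemble: both sides are lists of R strings of length C
  rw [PySem.List.pyRange_neg_one, PySem.List.pyRange_one]
  apply List.ext_getElem
  · simp only [List.length_map, List.length_range, hlen']
    omega
  · intro n h1 h2
    have hn : n < R := by simpa [hlen'] using h1
    simp only [List.getElem_map, List.getElem_range]
    have hrown : (g'[n]'(by omega)).length = C := l2 _ (List.getElem_mem _)
    have hgd : ∀ (k : Nat) (hk1 : n < g'.length) (hk2 : k < (g'[n]'hk1).length),
        (g'[n]'hk1)[k]'hk2 = pvCell g' n k := by
      intro k hk1 hk2
      unfold pvCell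
      rw [List.getElem?_eq_getElem hk1]
      simp only [Option.getD_some]
      rw [List.getElem?_eq_getElem hk2]
      rfl
    congr 1
    apply List.ext_getElem
    · simp only [List.length_map, List.length_range, hrown]
      omega
    · intro k k1 k2
      have hk : k < C := by simpa [hrown] using k1
      simp only [List.getElem_map, List.getElem_range]
      rw [hgd k]
      have hbase : pvCell (List.replicate R (List.replicate C '.')) n k = '.' := by
        unfold pvCell; simp [hn, hk]
      rw [l3 n k, hbase]
      have hcon : (PySem.Set.contains pts (mx + (k : Int), My - (n : Int)) = true) ↔
          (∃ p ∈ points, (pvX My p).toNat = n ∧ (pvY mx p).toNat = k) := by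
        rw [← hmem n k]; simp [PySem.Set.contains]
      rw [if_congr hcon rfl rfl]

-- ===== VERDICT =====
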